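-- pv_equiv track=rewrite | github.com/hakansabunis/tr-academic-research-agent | models/writer/build_pretrain_corpus.py | pack_greedy
-- ===== SOURCE A (Python) =====
-- def pack_greedy(docs_tokens: list[list[int]], max_seq: int, eos_id: int) -> list[list[int]]:
--     """Greedy atomic packing: each doc stays whole, EOS separates docs in a
--     chunk. A doc that alone exceeds max_seq gets truncated."""
--     chunks: list[list[int]] = []
--     cur: list[int] = []
--     dropped_truncated = 0
--     for tok in docs_tokens:
--         body = tok + [eos_id]
--         if len(body) > max_seq:
--             # Long doc — truncate to max_seq (rare). Keep what fits.
--             body = body[: max_seq - 1] + [eos_id]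
--             dropped_truncated += 1
--         # Does it fit in current chunk?
--         if cur and (len(cur) + len(body) > max_seq):
--             chunks.append(cur)
--             cur = body
--         else:
--             cur.extend(body)
--     if cur:
--         chunks.append(cur)
--     return chunks, dropped_truncated
-- ===== SOURCE B (Python) =====
-- def pack_greedy(docs_tokens: list[list[int]], max_seq: int, eos_id: int):
--     # Chunk-level decomposition: prepare all bodies first, then repeatedly carve
--     # off the maximal prefix of bodies that fits in one chunk (no running
--     # cur/flush state as in the accumulator formulation).
--     bodies = []
--     dropped_truncated = 0
--     for tok in docs_tokens:
--         body = tok + [eos_id]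
--         if len(body) > max_seq:
--             body = body[: max_seq - 1] + [eos_id]
--             dropped_truncated += 1
--         bodies.append(body)
--
--     chunks = []
--     i = 0
--     while i < len(bodies):
--         # start a chunk with the next body, then absorb bodies while it fits
--         chunk = list(bodies[i])
--         i += 1
--         while i < len(bodies) and len(chunk) + len(bodies[i]) <= max_seq:
--             chunk.extend(bodies[i])
--             i += 1
--         chunks.append(chunk)
--     return chunks, dropped_truncated
-- ===== Notes on version B (the rewrite author's own statement) =====
-- stated objective: alternative
-- what changed: A's single per-doc loop with a running current-chunk accumulator and end-of-loop flush is replaced by preparing all bodies first and then a chunk-level recursion that repeatedly carves off the maximal prefix of bodies fitting in one chunk, with no running cur/flush state.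
import Mathlib
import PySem

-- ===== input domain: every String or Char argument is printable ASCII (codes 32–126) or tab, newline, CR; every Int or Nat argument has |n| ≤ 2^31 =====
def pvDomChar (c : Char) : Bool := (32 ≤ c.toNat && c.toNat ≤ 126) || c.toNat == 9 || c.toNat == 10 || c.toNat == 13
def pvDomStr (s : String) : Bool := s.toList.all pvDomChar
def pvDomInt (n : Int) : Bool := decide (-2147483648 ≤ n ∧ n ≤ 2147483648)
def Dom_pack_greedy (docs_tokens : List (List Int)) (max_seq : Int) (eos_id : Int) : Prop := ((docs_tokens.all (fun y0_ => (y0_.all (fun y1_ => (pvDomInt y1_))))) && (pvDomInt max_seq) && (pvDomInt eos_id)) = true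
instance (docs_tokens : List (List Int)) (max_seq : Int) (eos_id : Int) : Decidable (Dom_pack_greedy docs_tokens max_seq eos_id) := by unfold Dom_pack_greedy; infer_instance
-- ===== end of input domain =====

-- B replaces A's per-doc accumulator-with-flush loop by a chunk-level recursion that carves off
-- the maximal fitting prefix of prepared bodies; objective: alternative decomposition, same cost.

-- ===== PORT A =====
def packA_loop (max_seq eos_id : Int) (docs : List (List Int))
    (chunks : List (List Int)) (cur : List Int) (dropped : Int) :
    List (List Int) × List Int × Int :=
  match docs with
  | [] => (chunks, cur, dropped)
  | tok :: rest =>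
    let body0 := tok ++ [eos_id]
    let st :=
      if max_seq < (body0.length : Int) then
        (PySem.List.slice body0 none (some (max_seq - 1)) ++ [eos_id], dropped + 1)
      else (body0, dropped)
    if cur ≠ [] ∧ max_seq < (cur.length : Int) + (st.1.length : Int) then
      packA_loop max_seq eos_id rest (chunks ++ [cur]) st.1 st.2
    else
      packA_loop max_seq eos_id rest chunks (cur ++ st.1) st.2

def pack_greedy (docs_tokens : List (List Int)) (max_seq : Int) (eos_id : Int) : List (List Int) × Int :=
  let r := packA_loop max_seq eos_id docs_tokens [] [] 0
  (if r.2.1 ≠ [] then r.1 ++ [r.2.1] else r.1, r.2.2)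

-- ===== PORT B =====
-- first loop of Source B: build the prepared bodies and the truncation count
def buildBodies (max_seq eos_id : Int) : List (List Int) → List (List Int) × Int
  | [] => ([], 0)
  | tok :: rest =>
    let body0 := tok ++ [eos_id]
    let st :=
      if max_seq < (body0.length : Int) then
        (PySem.List.slice body0 none (some (max_seq - 1)) ++ [eos_id], (1 : Int))
      else (body0, 0)
    let r := buildBodies max_seq eos_id rest
    (st.1 :: r.1, st.2 + r.2)

-- Source B's take_chunk: absorb following bodies while the chunk stays within max_seq
def takeChunk (max_seq : Int) (chunk : List Int) : List (List Int) → List Int × List (List Int)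
  | [] => (chunk, [])
  | b :: rest =>
    if (chunk.length : Int) + (b.length : Int) ≤ max_seq then
      takeChunk max_seq (chunk ++ b) rest
    else (chunk, b :: rest)

theorem takeChunk_len (max_seq : Int) (chunk : List Int) (bs : List (List Int)) :
    (takeChunk max_seq chunk bs).2.length ≤ bs.length := by
  induction bs generalizing chunk with
  | nil => simp [takeChunk]
  | cons b rest ih =>
    simp only [takeChunk]
    split
    · exact le_trans (ih _) (Nat.le_succ _)
    · simp

-- Source B's outer while loop: peel maximal fitting chunks off the body list
def packChunks (max_seq : Int) (bs : List (List Int)) : List (List Int) :=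
  match bs with
  | [] => []
  | b :: rest =>
    let r := takeChunk max_seq b rest
    r.1 :: packChunks max_seq r.2
termination_by bs.length
decreasing_by
  exact Nat.lt_succ_of_le (takeChunk_len max_seq b rest)

def pack_greedy_alt (docs_tokens : List (List Int)) (max_seq : Int) (eos_id : Int) : List (List Int) × Int :=
  let r := buildBodies max_seq eos_id docs_tokens
  (packChunks max_seq r.1, r.2)

-- ===== PRECONDITION & SPEC =====
def Spec_pack_greedy (docs_tokens : List (List Int)) (max_seq : Int) (eos_id : Int) (out : List (List Int) × Int) : Prop := out = pack_greedy_alt docs_tokens max_seq eos_id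
instance (docs_tokens : List (List Int)) (max_seq : Int) (eos_id : Int) (out : List (List Int) × Int) : Decidable (Spec_pack_greedy docs_tokens max_seq eos_id out) := by unfold Spec_pack_greedy; infer_instance

-- ===== CLAIM (what is proved, stated in full; the proofs are below) =====
def Claim_equal_pack_greedy : Prop := ∀ (docs_tokens : List (List Int)) (max_seq : Int) (eos_id : Int), Dom_pack_greedy docs_tokens max_seq eos_id → Spec_pack_greedy docs_tokens max_seq eos_id (pack_greedy docs_tokens max_seq eos_id)

-- ===== LEMMAS AND PROOFS =====

-- A's loop, phrased over already-prepared bodies (proof device)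
def loopA (m : Int) : List (List Int) → List (List Int) → List Int → List (List Int) × List Int
  | [], chunks, cur => (chunks, cur)
  | b :: rest, chunks, cur =>
    if cur ≠ [] ∧ m < (cur.length : Int) + (b.length : Int) then
      loopA m rest (chunks ++ [cur]) b
    else
      loopA m rest chunks (cur ++ b)

theorem packA_as_loopA (m e : Int) :
    ∀ (docs : List (List Int)) (chunks : List (List Int)) (cur : List Int) (d : Int),
    packA_loop m e docs chunks cur d =
      ((loopA m (buildBodies m e docs).1 chunks cur).1,
       (loopA m (buildBodies m e docs).1 chunks cur).2,
       d + (buildBodies m e docs).2) := by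
  intro docs
  induction docs with
  | nil => intro chunks cur d; simp [packA_loop, buildBodies, loopA]
  | cons tok rest ih =>
    intro chunks cur d
    simp only [packA_loop, buildBodies, loopA]
    split <;> (split <;> (rw [ih]; ring_nf))

theorem buildBodies_ne_nil (m e : Int) (docs : List (List Int)) :
    ∀ b ∈ (buildBodies m e docs).1, b ≠ [] := by
  induction docs with
  | nil => simp [buildBodies]
  | cons tok rest ih =>
    simp only [buildBodies, List.mem_cons]
    intro b hb
    rcases hb with h | h
    · subst h; split <;> simp
    · exact ih b h

theorem loopA_eq_packChunks (m : Int) :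
    ∀ (bs : List (List Int)), (∀ b ∈ bs, b ≠ []) →
    ∀ (cur : List Int), cur ≠ [] → ∀ (chunks : List (List Int)),
    (loopA m bs chunks cur).2 ≠ [] ∧
    (loopA m bs chunks cur).1 ++ [(loopA m bs chunks cur).2] =
      chunks ++ ((takeChunk m cur bs).1 :: packChunks m (takeChunk m cur bs).2) := by
  intro bs
  induction bs with
  | nil =>
    intro _ cur hcur chunks
    simp [loopA, takeChunk, packChunks, hcur]
  | cons b rest ih =>
    intro hne cur hcur chunks
    have hb : b ≠ [] := hne b (by simp)
    have hrest : ∀ x ∈ rest, x ≠ [] := fun x hx => hne x (by simp [hx])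
    simp only [loopA, takeChunk]
    by_cases hfit : (cur.length : Int) + (b.length : Int) ≤ m
    · have hcond : ¬ (cur ≠ [] ∧ m < (cur.length : Int) + (b.length : Int)) := by
        intro h; exact absurd (h.2) (not_lt.mpr hfit)
      rw [if_neg hcond, if_pos hfit]
      exact ih hrest (cur ++ b) (by simp [hcur]) chunks
    · have hcond : cur ≠ [] ∧ m < (cur.length : Int) + (b.length : Int) :=
        ⟨hcur, lt_of_not_ge hfit⟩
      rw [if_pos hcond, if_neg hfit]
      have := ih hrest b hb (chunks ++ [cur])
      refine ⟨this.1, ?_⟩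
      rw [this.2]
      have hpc : packChunks m (b :: rest) =
          (takeChunk m b rest).1 :: packChunks m (takeChunk m b rest).2 := by
        rw [packChunks]
      rw [hpc]
      simp

-- ===== VERDICT (by name: the statement is the Claim_ definition above) =====
theorem pack_greedy_spec : Claim_equal_pack_greedy := by
  intro docs max_seq eos_id _
  unfold Spec_pack_greedy pack_greedy pack_greedy_alt
  rw [packA_as_loopA]
  cases hbs : (buildBodies max_seq eos_id docs).1 with
  | nil =>
    have hpc0 : packChunks max_seq ([] : List (List Int)) = [] := by rw [packChunks]
    simp [hbs, loopA, hpc0]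
  | cons b rest =>
    have hne : ∀ x ∈ b :: rest, x ≠ [] := by
      rw [← hbs]; exact buildBodies_ne_nil _ _ _
    have hb : b ≠ [] := hne b (by simp)
    have hrest : ∀ x ∈ rest, x ≠ [] := fun x hx => hne x (by simp [hx])
    -- first iteration: cur = [] takes the else branch
    have h1 : loopA max_seq (b :: rest) [] [] = loopA max_seq rest [] b := by
      simp [loopA]
    rw [h1]
    dsimp only
    have h := loopA_eq_packChunks max_seq rest hrest b hb []
    have hpc : packChunks max_seq (b :: rest) =
        (takeChunk max_seq b rest).1 :: packChunks max_seq (takeChunk max_seq b rest).2 := by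
      rw [packChunks]
    rw [if_pos h.1, Prod.mk.injEq]
    refine ⟨?_, by ring⟩
    rw [h.2, hbs, hpc]
    simp
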